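-- pv_equiv track=rewrite | github.com/Schaitanya535/python-sandbox | advent_of_code/2025/day_08.py | get_product_of_boxes_in_crucuit
-- ===== SOURCE A (Python) =====
-- def get_sqared_distance(
--     first_box: tuple[int, int, int], second_box: tuple[int, int, int]
-- ) -> int:
--     x1, y1, z1 = first_box
--     x2, y2, z2 = second_box
--     return (x1 - x2) ** 2 + (y1 - y2) ** 2 + (z1 - z2) ** 2
--
-- def get_distances(box_coordinates: list[tuple[int, int, int]]):
--     number_of_boxes = len(box_coordinates)
--     distances: list[tuple[int, int, int]] = []
--     for i in range(0, number_of_boxes - 1):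
--         for j in range(i + 1, number_of_boxes):
--             distances.append(
--                 (get_sqared_distance(box_coordinates[i], box_coordinates[j]), i, j)
--             )
--     return sorted(distances)
--
-- def find(parent: dict[int, int], node: int) -> int:
--     """Find the root parent of a node with path compression"""
--     if node not in parent:
--         parent[node] = node
--     if parent[node] != node:
--         parent[node] = find(parent, parent[node])  # Path compression
--     return parent[node]
--
-- def connect(parent: dict[int, int], box1: int, box2: int) -> bool:
--     """Union operation - connect two boxes"""
--     root1 = find(parent, box1)
--     root2 = find(parent, box2)
--     if root1 != root2:
--         parent[root1] = root2
--
--     return root1 != root2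
--
-- def get_product_of_boxes_in_crucuit(
--     box_coordinates: list[tuple[int, int, int]], no_of_connections: int, top_n: int = 3
-- ):
--     distances = get_distances(box_coordinates)
--
--     # Pre-fill parent dictionary - each node is its own parent initially
--     parent: dict[int, int] = {i: i for i in range(len(box_coordinates))}
--
--     # Use the minimum of requested connections and available connections
--     max_connections = min(no_of_connections, len(distances))
--     for connection_number in range(0, max_connections):
--         _distance, box1, box2 = distances[connection_number]
--         connect(parent, box1, box2)
--
--     # Count nodes in each component
--     component_sizes: dict[int, int] = {}
--     for node in range(len(box_coordinates)):
--         root = find(parent, node)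
--         component_sizes[root] = component_sizes.get(root, 0) + 1
--
--     # Get the top N largest circuits and multiply them
--     sizes = sorted(component_sizes.values(), reverse=True)
--     result = 1
--     for i in range(min(top_n, len(sizes))):
--         result *= sizes[i]
--     return result
-- ===== SOURCE B (Python) =====
-- def get_product_of_boxes_in_crucuit(box_coordinates, no_of_connections, top_n=3):
--     number_of_boxes = len(box_coordinates)
--     distances = []
--     for i in range(0, number_of_boxes - 1):
--         for j in range(i + 1, number_of_boxes):
--             x1, y1, z1 = box_coordinates[i]
--             x2, y2, z2 = box_coordinates[j]
--             distances.append(((x1 - x2) ** 2 + (y1 - y2) ** 2 + (z1 - z2) ** 2, i, j))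
--     distances.sort()
--
--     # Label-propagation components instead of union-find: comp[v] is the
--     # current colour of node v; joining two boxes repaints one colour.
--     comp = list(range(number_of_boxes))
--     max_connections = min(no_of_connections, len(distances))
--     for k in range(0, max_connections):
--         _d, a, b = distances[k]
--         ca, cb = comp[a], comp[b]
--         if ca != cb:
--             comp = [ca if c == cb else c for c in comp]
--
--     counts = {}
--     for c in comp:
--         counts[c] = counts.get(c, 0) + 1
--     sizes = sorted(counts.values(), reverse=True)
--     result = 1
--     for s in sizes[:max(0, min(top_n, len(sizes)))]:
--         result *= s
--     return result
-- ===== Notes on version B (the rewrite author's own statement) =====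
-- stated objective: alternative
-- what changed: Replaces the union-find (parent dict with recursive find + path compression) by a label-propagation scheme: a flat comp list of colours, where joining an edge repaints one colour into the other and component sizes are colour counts; edge generation, sorting, the connection cap and the top-n product are kept.
import Mathlib
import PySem

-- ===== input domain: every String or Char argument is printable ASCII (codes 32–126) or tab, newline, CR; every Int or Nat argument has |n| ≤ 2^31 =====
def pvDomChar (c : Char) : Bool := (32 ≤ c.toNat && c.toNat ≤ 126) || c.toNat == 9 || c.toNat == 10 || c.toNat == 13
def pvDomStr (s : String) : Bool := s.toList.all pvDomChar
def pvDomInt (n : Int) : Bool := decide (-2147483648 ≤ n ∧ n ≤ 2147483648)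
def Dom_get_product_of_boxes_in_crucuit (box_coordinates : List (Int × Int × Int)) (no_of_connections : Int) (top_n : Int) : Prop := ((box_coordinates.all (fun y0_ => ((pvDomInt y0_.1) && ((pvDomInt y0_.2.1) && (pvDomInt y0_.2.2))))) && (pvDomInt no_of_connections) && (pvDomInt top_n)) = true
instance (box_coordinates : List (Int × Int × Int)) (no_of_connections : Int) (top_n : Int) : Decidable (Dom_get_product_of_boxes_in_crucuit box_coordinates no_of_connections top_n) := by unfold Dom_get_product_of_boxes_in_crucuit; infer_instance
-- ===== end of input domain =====

-- B replaces A's union-find parent dictionary by a label-propagation component list (repainting colours); same edge generation, sort, cap and top-n product. Alternative data structure, similar cost.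


-- ===== PORT A =====
def get_sqared_distance (first_box : Int × Int × Int) (second_box : Int × Int × Int) : Int :=
  (first_box.1 - second_box.1) ^ 2 + (first_box.2.1 - second_box.2.1) ^ 2 + (first_box.2.2 - second_box.2.2) ^ 2

-- Python's `sorted` on 3-tuples of ints compares lexicographically; PySem.List.sorted has no
-- 3-component key, so the lexicographic strict order is written out by hand here (exact:
-- Python tuple `<` on (d, i, j)) and fed to the same insertion fold `sorted` is defined by
-- (PySem.List.sorted_eq_foldl_insertBy).
def pyLexLt3 (x y : Int × Int × Int) : Bool :=
  decide (x.1 < y.1 ∨ (x.1 = y.1 ∧ (x.2.1 < y.2.1 ∨ (x.2.1 = y.2.1 ∧ x.2.2 < y.2.2))))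

def pySorted3 (xs : List (Int × Int × Int)) : List (Int × Int × Int) :=
  xs.foldl (fun acc x => PySem.List.insertBy pyLexLt3 x acc) []

def get_distances (box_coordinates : List (Int × Int × Int)) : List (Int × Int × Int) :=
  let number_of_boxes : Int := PySem.List.len box_coordinates
  let distances : List (Int × Int × Int) :=
    (PySem.List.pyRange 0 (number_of_boxes - 1) 1).foldl (fun acc i =>
      (PySem.List.pyRange (i + 1) number_of_boxes 1).foldl (fun acc j =>
        acc ++ [(get_sqared_distance (PySem.List.pyGetD box_coordinates i (0, 0, 0))
                  (PySem.List.pyGetD box_coordinates j (0, 0, 0)), i, j)]) acc) []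
  pySorted3 distances

-- `find` with path compression; `fuel` is only a totality guard (the Python recursion
-- terminates on every state A builds; fuel = number of boxes + 1 always suffices, see lemmas).
def findA (fuel : Nat) (parent : PySem.Dict Int Int) (node : Int) : PySem.Dict Int Int × Int :=
  match fuel with
  | 0 => (parent, node)
  | fuel + 1 =>
    let parent := if parent.contains node then parent else parent.insert node node
    let p := parent.getD node node
    if p ≠ node then
      let res := findA fuel parent p
      (res.1.insert node res.2, res.2)
    else (parent, p)

def connectA (fuel : Nat) (parent : PySem.Dict Int Int) (box1 : Int) (box2 : Int) :
    PySem.Dict Int Int × Bool :=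
  let f1 := findA fuel parent box1
  let f2 := findA fuel f1.1 box2
  if f1.2 ≠ f2.2 then (f2.1.insert f1.2 f2.2, true) else (f2.1, false)

def get_product_of_boxes_in_crucuit (box_coordinates : List (Int × Int × Int)) (no_of_connections : Int) (top_n : Int) : Int :=
  let distances := get_distances box_coordinates
  let fuel := box_coordinates.length + 1
  let parent0 : PySem.Dict Int Int :=
    (PySem.List.pyRange 0 (PySem.List.len box_coordinates) 1).foldl (fun d i => d.insert i i) PySem.Dict.empty
  let max_connections := min no_of_connections (PySem.List.len distances)
  let parent1 := (PySem.List.pyRange 0 max_connections 1).foldl (fun par k =>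
      let t := PySem.List.pyGetD distances k (0, 0, 0)
      (connectA fuel par t.2.1 t.2.2).1) parent0
  let st := (PySem.List.pyRange 0 (PySem.List.len box_coordinates) 1).foldl (fun st node =>
      let fr := findA fuel st.1 node
      (fr.1, st.2.insert fr.2 (st.2.getD fr.2 0 + 1))) (parent1, (PySem.Dict.empty : PySem.Dict Int Int))
  let sizes := PySem.List.sorted st.2.values (fun x => x) true
  (PySem.List.pyRange 0 (min top_n (PySem.List.len sizes)) 1).foldl
    (fun result i => result * PySem.List.pyGetD sizes i 1) 1

-- ===== PORT B =====
def get_product_of_boxes_in_crucuit_alt (box_coordinates : List (Int × Int × Int)) (no_of_connections : Int) (top_n : Int) : Int :=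
  let number_of_boxes : Int := PySem.List.len box_coordinates
  let distances := pySorted3
    ((PySem.List.pyRange 0 (number_of_boxes - 1) 1).foldl (fun acc i =>
      (PySem.List.pyRange (i + 1) number_of_boxes 1).foldl (fun acc j =>
        let b1 := PySem.List.pyGetD box_coordinates i (0, 0, 0)
        let b2 := PySem.List.pyGetD box_coordinates j (0, 0, 0)
        acc ++ [((b1.1 - b2.1) ^ 2 + (b1.2.1 - b2.2.1) ^ 2 + (b1.2.2 - b2.2.2) ^ 2, i, j)]) acc) [])
  let max_connections := min no_of_connections (PySem.List.len distances)
  let comp := (PySem.List.pyRange 0 max_connections 1).foldl (fun comp k =>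
      let t := PySem.List.pyGetD distances k (0, 0, 0)
      let ca := PySem.List.pyGetD comp t.2.1 0
      let cb := PySem.List.pyGetD comp t.2.2 0
      if ca ≠ cb then comp.map (fun c => if c = cb then ca else c) else comp)
    (PySem.List.pyRange 0 number_of_boxes 1)
  let counts := comp.foldl (fun d c => d.insert c (d.getD c 0 + 1)) (PySem.Dict.empty : PySem.Dict Int Int)
  let sizes := PySem.List.sorted counts.values (fun x => x) true
  (PySem.List.slice sizes none (some (max 0 (min top_n (PySem.List.len sizes))))).foldl
    (fun result s => result * s) 1

-- ===== PRECONDITION & SPEC =====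
def Spec_get_product_of_boxes_in_crucuit (box_coordinates : List (Int × Int × Int)) (no_of_connections : Int) (top_n : Int) (out : Int) : Prop := out = get_product_of_boxes_in_crucuit_alt box_coordinates no_of_connections top_n
instance (box_coordinates : List (Int × Int × Int)) (no_of_connections : Int) (top_n : Int) (out : Int) : Decidable (Spec_get_product_of_boxes_in_crucuit box_coordinates no_of_connections top_n out) := by unfold Spec_get_product_of_boxes_in_crucuit; infer_instance

-- ===== CLAIM (what is proved, stated in full; the proofs are below) =====
def Claim_equal_get_product_of_boxes_in_crucuit : Prop := ∀ (box_coordinates : List (Int × Int × Int)) (no_of_connections : Int) (top_n : Int), Dom_get_product_of_boxes_in_crucuit box_coordinates no_of_connections top_n → Spec_get_product_of_boxes_in_crucuit box_coordinates no_of_connections top_n (get_product_of_boxes_in_crucuit box_coordinates no_of_connections top_n)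

-- ===== LEMMAS AND PROOFS =====

def stepD (d : PySem.Dict Int Int) (x : Int) : Int := d.getD x x

def FixF (f : Int → Int) (x : Int) : Prop := f x = x

def RootsTo (d : PySem.Dict Int Int) (x r : Int) : Prop :=
  ∃ k : Nat, (stepD d)^[k] x = r ∧ FixF (stepD d) r

def WFd (n : Int) (d : PySem.Dict Int Int) : Prop :=
  (∀ x : Int, 0 ≤ x → x < n → d.contains x = true) ∧
  (∀ x : Int, 0 ≤ x → x < n → 0 ≤ stepD d x ∧ stepD d x < n) ∧
  (∀ x : Int, 0 ≤ x → x < n → ∃ k : Nat, FixF (stepD d) ((stepD d)^[k] x))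

theorem fix_iterate {f : Int → Int} {r : Int} (h : FixF f r) : ∀ m, f^[m] r = r := by
  intro m; induction m with
  | zero => rfl
  | succ m ih => rw [Function.iterate_succ_apply, h, ih]

theorem roots_unique {d : PySem.Dict Int Int} {x r r' : Int}
    (h1 : RootsTo d x r) (h2 : RootsTo d x r') : r = r' := by
  obtain ⟨k, hk, hfk⟩ := h1
  obtain ⟨k', hk', hfk'⟩ := h2
  rcases le_total k k' with h | h
  · have : (stepD d)^[k'] x = r := by
      have : k' = (k' - k) + k := by omega
      rw [this, Function.iterate_add_apply, hk, fix_iterate hfk]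
    rw [← hk', this]
  · have : (stepD d)^[k] x = r' := by
      have : k = (k - k') + k' := by
        omega
      rw [this, Function.iterate_add_apply, hk', fix_iterate hfk']
    rw [← hk, this]

theorem roots_total {n : Int} {d : PySem.Dict Int Int} (hWF : WFd n d) {x : Int}
    (h0 : 0 ≤ x) (h1 : x < n) : ∃ r, RootsTo d x r := by
  obtain ⟨k, hk⟩ := hWF.2.2 x h0 h1
  exact ⟨_, k, rfl, hk⟩

theorem iter_range {n : Int} {d : PySem.Dict Int Int} (hWF : WFd n d) {x : Int}
    (h0 : 0 ≤ x) (h1 : x < n) : ∀ k, 0 ≤ (stepD d)^[k] x ∧ (stepD d)^[k] x < n := by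
  intro k; induction k with
  | zero => exact ⟨h0, h1⟩
  | succ k ih =>
    rw [Function.iterate_succ_apply']
    exact hWF.2.1 _ ih.1 ih.2

theorem roots_range {n : Int} {d : PySem.Dict Int Int} (hWF : WFd n d) {x r : Int}
    (h0 : 0 ≤ x) (h1 : x < n) (h : RootsTo d x r) : 0 ≤ r ∧ r < n := by
  obtain ⟨k, hk, -⟩ := h
  rw [← hk]; exact iter_range hWF h0 h1 k

-- pigeonhole: a terminating chain inside [0, n) reaches a fixpoint in < n.toNat steps
theorem chain_bound {n : Int} {f : Int → Int}
    (hmaps : ∀ y : Int, 0 ≤ y → y < n → 0 ≤ f y ∧ f y < n) {x : Int}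
    (h0 : 0 ≤ x) (h1 : x < n) :
    ∀ k, FixF f (f^[k] x) → ∃ k' < n.toNat, FixF f (f^[k'] x) := by
  have hin : ∀ k, 0 ≤ f^[k] x ∧ f^[k] x < n := by
    intro k; induction k with
    | zero => exact ⟨h0, h1⟩
    | succ k ih => rw [Function.iterate_succ_apply']; exact hmaps _ ih.1 ih.2
  intro k
  induction k using Nat.strong_induction_on with
  | _ k IH =>
    intro hfix
    by_cases hk : k < n.toNat
    · exact ⟨k, hk, hfix⟩
    · -- k ≥ n.toNat : pigeonhole on the first k+1 chain elements
      have hcard : (Finset.Ico (0:Int) n).card < (Finset.range (k+1)).card := by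
        rw [Int.card_Ico]; simp; omega
      have hmapsto : ∀ i ∈ Finset.range (k+1), f^[i] x ∈ Finset.Ico (0:Int) n := by
        intro i _; rw [Finset.mem_Ico]; exact hin i
      obtain ⟨a, ha, b, hb, hne, heq⟩ :=
        Finset.exists_ne_map_eq_of_card_lt_of_maps_to hcard hmapsto
      simp only [Finset.mem_range] at ha hb
      -- wlog a < b
      rcases Nat.lt_or_ge a b with hab | hab
      case _ =>
        have hper : ∀ t, f^[t + b] x = f^[t + a] x := by
          intro t
          rw [Function.iterate_add_apply, Function.iterate_add_apply, heq]
        have hlt : k - (b - a) < k := by omega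
        have : FixF f (f^[k - (b - a)] x) := by
          have : f^[(k - (b-a) - a) + b] x = f^[(k - (b-a) - a) + a] x := hper _
          have e1 : (k - (b-a) - a) + b = k := by omega
          have e2 : (k - (b-a) - a) + a = k - (b-a) := by omega
          rw [e1, e2] at this
          rwa [← this]
        exact IH _ hlt this
      case _ =>
        have hab' : b < a := by omega
        have hper : ∀ t, f^[t + a] x = f^[t + b] x := by
          intro t
          rw [Function.iterate_add_apply, Function.iterate_add_apply, heq]
        have hlt : k - (a - b) < k := by omega
        have : FixF f (f^[k - (a - b)] x) := by
          have : f^[(k - (a-b) - b) + a] x = f^[(k - (a-b) - b) + b] x := hper _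
          have e1 : (k - (a-b) - b) + a = k := by omega
          have e2 : (k - (a-b) - b) + b = k - (a-b) := by omega
          rw [e1, e2] at this
          rwa [← this]
        exact IH _ hlt this

theorem stepD_insert (d : PySem.Dict Int Int) (a v x : Int) :
    stepD (d.insert a v) x = if x = a then v else stepD d x := by
  simp [stepD, PySem.Dict.getD_insert]

theorem fix_insert_root {d : PySem.Dict Int Int} {x r : Int}
    (hfix : FixF (stepD d) r) : FixF (stepD (d.insert x r)) r := by
  unfold FixF
  rw [stepD_insert]
  split_ifs with h
  · rfl
  · exact hfix

-- path-compression insert: adding x ↦ r where r is x's root changes nobody's root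
theorem insert_compress_fwd {d : PySem.Dict Int Int} {x r : Int}
    (hr : RootsTo d x r) :
    ∀ (k : Nat) (y r' : Int), (stepD d)^[k] y = r' → FixF (stepD d) r' →
      RootsTo (d.insert x r) y r' := by
  have hfixr' : FixF (stepD (d.insert x r)) r := fix_insert_root (by
    obtain ⟨k, hk, hf⟩ := hr; exact hf)
  intro k
  induction k with
  | zero =>
    intro y r' hch hf
    simp only [Function.iterate_zero_apply] at hch
    subst hch
    by_cases hyx : y = x
    · subst hyx
      have : r = y := roots_unique hr ⟨0, rfl, hf⟩
      subst this
      exact ⟨0, rfl, hfixr'⟩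
    · exact ⟨0, rfl, by unfold FixF; rw [stepD_insert]; simp [hyx]; exact hf⟩
  | succ k ih =>
    intro y r' hch hf
    by_cases hyx : y = x
    · subst hyx
      have : r = r' := roots_unique hr ⟨k+1, hch, hf⟩
      subst this
      exact ⟨1, by simp [stepD_insert], hfixr'⟩
    · rw [Function.iterate_succ_apply] at hch
      obtain ⟨k', hk', hf'⟩ := ih (stepD d y) r' hch hf
      refine ⟨k' + 1, ?_, hf'⟩
      rw [Function.iterate_succ_apply]
      have : stepD (d.insert x r) y = stepD d y := by rw [stepD_insert]; simp [hyx]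
      rw [this, hk']

theorem insert_compress_bwd {d : PySem.Dict Int Int} {x r : Int}
    (hr : RootsTo d x r) :
    ∀ (k : Nat) (y r' : Int), (stepD (d.insert x r))^[k] y = r' →
      FixF (stepD (d.insert x r)) r' → RootsTo d y r' := by
  have hfixr : FixF (stepD d) r := by obtain ⟨k, hk, hf⟩ := hr; exact hf
  have hfixr' : FixF (stepD (d.insert x r)) r := fix_insert_root hfixr
  intro k
  induction k with
  | zero =>
    intro y r' hch hf
    simp only [Function.iterate_zero_apply] at hch
    subst hch
    by_cases hyx : y = x
    · subst hyx
      have hry : r = y := by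
        have := hf
        unfold FixF at this
        rw [stepD_insert] at this
        simpa using this
      subst hry
      exact hr
    · refine ⟨0, rfl, ?_⟩
      have := hf
      unfold FixF at this ⊢
      rw [stepD_insert] at this
      simpa [hyx] using this
  | succ k ih =>
    intro y r' hch hf
    by_cases hyx : y = x
    · rw [Function.iterate_succ_apply] at hch
      have hstep : stepD (d.insert x r) y = r := by rw [stepD_insert]; simp [hyx]
      rw [hstep, fix_iterate hfixr' k] at hch
      subst hch
      rw [hyx]
      exact hr
    · rw [Function.iterate_succ_apply] at hch
      have hstep : stepD (d.insert x r) y = stepD d y := by rw [stepD_insert]; simp [hyx]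
      rw [hstep] at hch
      obtain ⟨k', hk', hf'⟩ := ih (stepD d y) r' hch hf
      exact ⟨k' + 1, by rw [Function.iterate_succ_apply, hk'], hf'⟩

theorem insert_compress {n : Int} {d : PySem.Dict Int Int} {x r : Int}
    (hWF : WFd n d) (h0 : 0 ≤ x) (h1 : x < n) (hr : RootsTo d x r) :
    WFd n (d.insert x r) ∧ ∀ y r', RootsTo d y r' ↔ RootsTo (d.insert x r) y r' := by
  have hrr := roots_range hWF h0 h1 hr
  have hiff : ∀ y r', RootsTo d y r' ↔ RootsTo (d.insert x r) y r' := by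
    intro y r'
    constructor
    · rintro ⟨k, hk, hf⟩; exact insert_compress_fwd hr k y r' hk hf
    · rintro ⟨k, hk, hf⟩; exact insert_compress_bwd hr k y r' hk hf
  refine ⟨⟨?_, ?_, ?_⟩, hiff⟩
  · intro y hy0 hy1
    rw [PySem.Dict.contains_insert]
    simp [hWF.1 y hy0 hy1]
  · intro y hy0 hy1
    rw [stepD_insert]
    split_ifs with h
    · exact hrr
    · exact hWF.2.1 y hy0 hy1
  · intro y hy0 hy1
    obtain ⟨ry, hry⟩ := roots_total hWF hy0 hy1
    obtain ⟨k, hk, hf⟩ := (hiff y ry).1 hry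
    exact ⟨k, by rw [hk]; exact hf⟩

-- union insert: r1, r2 distinct roots; linking r1 ↦ r2 merges the two classes
theorem insert_merge_fwd {d : PySem.Dict Int Int} {r1 r2 : Int}
    (hf1 : FixF (stepD d) r1) (hf2 : FixF (stepD d) r2) (hne : r1 ≠ r2) :
    ∀ (k : Nat) (y r' : Int), (stepD d)^[k] y = r' → FixF (stepD d) r' →
      RootsTo (d.insert r1 r2) y (if r' = r1 then r2 else r') := by
  have hstep2 : stepD (d.insert r1 r2) r2 = r2 := by
    rw [stepD_insert]; simp [hne.symm]; exact hf2
  have hfix2 : FixF (stepD (d.insert r1 r2)) r2 := hstep2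
  intro k
  induction k with
  | zero =>
    intro y r' hch hf
    simp only [Function.iterate_zero_apply] at hch
    subst hch
    by_cases hyr : y = r1
    · rw [if_pos hyr, hyr]
      exact ⟨1, by simp [stepD_insert], hfix2⟩
    · rw [if_neg hyr]
      refine ⟨0, rfl, ?_⟩
      unfold FixF
      rw [stepD_insert]
      simp [hyr]; exact hf
  | succ k ih =>
    intro y r' hch hf
    by_cases hfy : FixF (stepD d) y
    · have hry : r' = y := by rw [← hch, fix_iterate hfy]
      rw [hry]
      by_cases hyr : y = r1
      · rw [if_pos hyr, hyr]
        exact ⟨1, by simp [stepD_insert], hfix2⟩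
      · rw [if_neg hyr]
        refine ⟨0, rfl, ?_⟩
        unfold FixF
        rw [stepD_insert]
        simp [hyr]; exact hfy
    · have hyr : y ≠ r1 := fun h => hfy (h ▸ hf1)
      rw [Function.iterate_succ_apply] at hch
      obtain ⟨k', hk', hf'⟩ := ih (stepD d y) r' hch hf
      refine ⟨k' + 1, ?_, hf'⟩
      rw [Function.iterate_succ_apply]
      have : stepD (d.insert r1 r2) y = stepD d y := by rw [stepD_insert]; simp [hyr]
      rw [this, hk']

theorem insert_merge {n : Int} {d : PySem.Dict Int Int} {r1 r2 : Int}
    (hWF : WFd n d) (h10 : 0 ≤ r1) (h11 : r1 < n) (h20 : 0 ≤ r2) (h21 : r2 < n)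
    (hf1 : FixF (stepD d) r1) (hf2 : FixF (stepD d) r2) (hne : r1 ≠ r2) :
    WFd n (d.insert r1 r2) ∧
    ∀ y r', RootsTo d y r' → RootsTo (d.insert r1 r2) y (if r' = r1 then r2 else r') := by
  have hfwd : ∀ y r', RootsTo d y r' → RootsTo (d.insert r1 r2) y (if r' = r1 then r2 else r') := by
    rintro y r' ⟨k, hk, hf⟩
    exact insert_merge_fwd hf1 hf2 hne k y r' hk hf
  refine ⟨⟨?_, ?_, ?_⟩, hfwd⟩
  · intro y hy0 hy1
    rw [PySem.Dict.contains_insert]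
    simp [hWF.1 y hy0 hy1]
  · intro y hy0 hy1
    rw [stepD_insert]
    split_ifs with h
    · exact ⟨h20, h21⟩
    · exact hWF.2.1 y hy0 hy1
  · intro y hy0 hy1
    obtain ⟨ry, hry⟩ := roots_total hWF hy0 hy1
    obtain ⟨k, hk, hf⟩ := hfwd y ry hry
    exact ⟨k, by rw [hk]; exact hf⟩

theorem roots_fix {d : PySem.Dict Int Int} {x r : Int} (h : RootsTo d x r) :
    FixF (stepD d) r := by obtain ⟨k, -, hf⟩ := h; exact hf

theorem findA_unfold {d : PySem.Dict Int Int} {x : Int} (hc : d.contains x = true) (f : Nat) :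
    findA (f+1) d x = if stepD d x ≠ x then
        ((findA f d (stepD d x)).1.insert x (findA f d (stepD d x)).2, (findA f d (stepD d x)).2)
      else (d, stepD d x) := by
  simp only [findA, hc, if_true, stepD]

theorem findA_spec {n : Int} : ∀ (k fuel : Nat) (d : PySem.Dict Int Int) (x : Int),
    WFd n d → 0 ≤ x → x < n → FixF (stepD d) ((stepD d)^[k] x) → k < fuel →
    WFd n (findA fuel d x).1 ∧ RootsTo d x (findA fuel d x).2 ∧
    (∀ y r', RootsTo d y r' ↔ RootsTo (findA fuel d x).1 y r') := by
  intro k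
  induction k with
  | zero =>
    intro fuel d x hWF hx0 hx1 hfix hk
    obtain ⟨f, rfl⟩ : ∃ f, fuel = f + 1 := ⟨fuel - 1, by omega⟩
    simp only [Function.iterate_zero_apply] at hfix
    rw [findA_unfold (hWF.1 x hx0 hx1)]
    rw [if_neg (by simpa using hfix)]
    refine ⟨hWF, ⟨0, hfix.symm, ?_⟩, fun y r' => Iff.rfl⟩
    show FixF (stepD d) (stepD d x)
    unfold FixF
    rw [hfix, hfix]
  | succ k ih =>
    intro fuel d x hWF hx0 hx1 hfix hk
    obtain ⟨f, rfl⟩ : ∃ f, fuel = f + 1 := ⟨fuel - 1, by omega⟩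
    rw [findA_unfold (hWF.1 x hx0 hx1)]
    by_cases hp : stepD d x = x
    · rw [if_neg (by simpa using hp)]
      refine ⟨hWF, ⟨0, hp.symm, ?_⟩, fun y r' => Iff.rfl⟩
      show FixF (stepD d) (stepD d x)
      unfold FixF
      rw [hp, hp]
    · rw [if_pos (by simpa using hp)]
      have hrange := hWF.2.1 x hx0 hx1
      rw [Function.iterate_succ_apply] at hfix
      obtain ⟨hWF1, hroot1, hiff1⟩ := ih f d (stepD d x) hWF hrange.1 hrange.2 hfix (by omega)
      set res := findA f d (stepD d x) with hres
      have hrootx : RootsTo d x res.2 := by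
        obtain ⟨k2, hk2, hf2⟩ := hroot1
        exact ⟨k2 + 1, by rw [Function.iterate_succ_apply, hk2], hf2⟩
      have hrx : RootsTo res.1 x res.2 := (hiff1 x res.2).1 hrootx
      obtain ⟨hWFf, hifff⟩ := insert_compress hWF1 hx0 hx1 hrx
      refine ⟨hWFf, hrootx, fun y r' => (hiff1 y r').trans (hifff y r')⟩

theorem findA_spec' {n : Int} {fuel : Nat} {d : PySem.Dict Int Int} {x : Int}
    (hWF : WFd n d) (hx0 : 0 ≤ x) (hx1 : x < n) (hfuel : n.toNat < fuel) :
    WFd n (findA fuel d x).1 ∧ RootsTo d x (findA fuel d x).2 ∧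
    (∀ y r', RootsTo d y r' ↔ RootsTo (findA fuel d x).1 y r') := by
  obtain ⟨k, hkfix⟩ := hWF.2.2 x hx0 hx1
  obtain ⟨k', hk', hfix'⟩ := chain_bound hWF.2.1 hx0 hx1 k hkfix
  exact findA_spec k' fuel d x hWF hx0 hx1 hfix' (by omega)

theorem connectA_eq (fuel : Nat) (d : PySem.Dict Int Int) (i j : Int) :
    connectA fuel d i j = if (findA fuel d i).2 ≠ (findA fuel (findA fuel d i).1 j).2 then
        ((findA fuel (findA fuel d i).1 j).1.insert (findA fuel d i).2 (findA fuel (findA fuel d i).1 j).2, true)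
      else ((findA fuel (findA fuel d i).1 j).1, false) := rfl

theorem connectA_spec {n : Int} {fuel : Nat} {d : PySem.Dict Int Int} {i j : Int}
    (hWF : WFd n d) (hi0 : 0 ≤ i) (hi1 : i < n) (hj0 : 0 ≤ j) (hj1 : j < n)
    (hfuel : n.toNat < fuel) :
    ∃ ri rj, RootsTo d i ri ∧ RootsTo d j rj ∧ WFd n (connectA fuel d i j).1 ∧
      ∀ y r', RootsTo d y r' →
        RootsTo (connectA fuel d i j).1 y (if ri = rj then r' else if r' = ri then rj else r') := by
  obtain ⟨hWF1, hri, hiff1⟩ := findA_spec' (d := d) (x := i) hWF hi0 hi1 hfuel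
  set f1 := findA fuel d i with hf1
  obtain ⟨hWF2, hrj1, hiff2⟩ := findA_spec' (d := f1.1) (x := j) hWF1 hj0 hj1 hfuel
  set f2 := findA fuel f1.1 j with hf2
  have hrj : RootsTo d j f2.2 := (hiff1 j f2.2).mpr hrj1
  refine ⟨f1.2, f2.2, hri, hrj, ?_⟩
  rw [connectA_eq, ← hf1, ← hf2]
  by_cases heq : f1.2 = f2.2
  · rw [if_neg (by simpa using heq)]
    constructor
    · exact hWF2
    · intro y r' h
      rw [if_pos heq]
      exact (hiff2 y r').1 ((hiff1 y r').1 h)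
  · rw [if_pos (by simpa using heq)]
    have hfixri : FixF (stepD f2.1) f1.2 :=
      roots_fix ((hiff2 i f1.2).1 ((hiff1 i f1.2).1 hri))
    have hfixrj : FixF (stepD f2.1) f2.2 := roots_fix ((hiff2 j f2.2).1 hrj1)
    have hriR := roots_range hWF hi0 hi1 hri
    have hrjR := roots_range hWF hj0 hj1 hrj
    obtain ⟨hWFm, hfwd⟩ :=
      insert_merge hWF2 hriR.1 hriR.2 hrjR.1 hrjR.2 hfixri hfixrj heq
    refine ⟨hWFm, ?_⟩
    intro y r' h
    rw [if_neg heq]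
    exact hfwd y r' ((hiff2 y r').1 ((hiff1 y r').1 h))


def InvAB (n : Int) (d : PySem.Dict Int Int) (comp : List Int) : Prop :=
  WFd n d ∧ comp.length = n.toNat ∧
  ∀ i j ri rj : Int, 0 ≤ i → i < n → 0 ≤ j → j < n →
    RootsTo d i ri → RootsTo d j rj →
    (ri = rj ↔ PySem.List.pyGetD comp i 0 = PySem.List.pyGetD comp j 0)

theorem foldl_ins_getD (l : List Int) :
    ∀ (d : PySem.Dict Int Int) (x : Int),
    (l.foldl (fun d i => d.insert i i) d).getD x x = if x ∈ l then x else d.getD x x := by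
  induction l with
  | nil => intro d x; simp
  | cons a l ih =>
    intro d x
    simp only [List.foldl_cons, ih, PySem.Dict.getD_insert, List.mem_cons]
    by_cases h1 : x ∈ l
    · simp [h1]
    · by_cases h2 : x = a
      · simp [h2]
      · simp [h1, h2]

theorem foldl_ins_contains (l : List Int) :
    ∀ (d : PySem.Dict Int Int) (x : Int),
    (l.foldl (fun d i => d.insert i i) d).contains x = (decide (x ∈ l) || d.contains x) := by
  induction l with
  | nil => intro d x; simp
  | cons a l ih =>
    intro d x
    simp only [List.foldl_cons, ih, PySem.Dict.contains_insert, List.mem_cons]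
    by_cases h1 : x ∈ l
    · simp [h1]
    · by_cases h2 : x = a
      · simp [h2]
      · simp [h1, h2]

theorem init_step {n x : Int} (h0 : 0 ≤ x) (h1 : x < n) :
    stepD ((PySem.List.pyRange 0 n 1).foldl (fun d i => d.insert i i) PySem.Dict.empty) x = x := by
  unfold stepD
  rw [foldl_ins_getD]
  rw [if_pos (PySem.List.mem_pyRange_one.mpr ⟨h0, h1⟩)]

theorem init_WF (n : Int) :
    WFd n ((PySem.List.pyRange 0 n 1).foldl (fun d i => d.insert i i) PySem.Dict.empty) := by
  refine ⟨?_, ?_, ?_⟩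
  · intro x h0 h1
    rw [foldl_ins_contains]
    simp [PySem.List.mem_pyRange_one.mpr ⟨h0, h1⟩]
  · intro x h0 h1
    rw [init_step h0 h1]
    exact ⟨h0, h1⟩
  · intro x h0 h1
    exact ⟨0, init_step h0 h1⟩

theorem init_root {n x r : Int} (h0 : 0 ≤ x) (h1 : x < n)
    (h : RootsTo ((PySem.List.pyRange 0 n 1).foldl (fun d i => d.insert i i) PySem.Dict.empty) x r) :
    r = x :=
  roots_unique h ⟨0, rfl, init_step h0 h1⟩

theorem pyGetD_pyRange_self {n i : Int} (h0 : 0 ≤ i) (h1 : i < n) :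
    PySem.List.pyGetD (PySem.List.pyRange 0 n 1) i 0 = i := by
  rw [PySem.List.pyGetD_eq_getElem _ _ h0 (by rw [PySem.List.length_pyRange_one]; omega)]
  rw [PySem.List.getElem_pyRange_one]
  omega

theorem init_Inv (n : Int) :
    InvAB n ((PySem.List.pyRange 0 n 1).foldl (fun d i => d.insert i i) PySem.Dict.empty)
      (PySem.List.pyRange 0 n 1) := by
  refine ⟨init_WF n, by rw [PySem.List.length_pyRange_one]; omega, ?_⟩
  intro i j ri rj hi0 hi1 hj0 hj1 hri hrj
  rw [init_root hi0 hi1 hri, init_root hj0 hj1 hrj]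
  rw [pyGetD_pyRange_self hi0 hi1, pyGetD_pyRange_self hj0 hj1]

theorem merge_kernel {ra rb ca cb ri rj Li Lj : Int}
    (Iia : ri = ra ↔ Li = ca) (Iib : ri = rb ↔ Li = cb)
    (Ija : rj = ra ↔ Lj = ca) (Ijb : rj = rb ↔ Lj = cb)
    (Iij : ri = rj ↔ Li = Lj) :
    ((if ri = ra then rb else ri) = (if rj = ra then rb else rj)) ↔
    ((if Li = cb then ca else Li) = (if Lj = cb then ca else Lj)) := by
  split_ifs <;> omega

theorem edge_step {n : Int} {fuel : Nat} {d : PySem.Dict Int Int} {comp : List Int}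
    (hInv : InvAB n d comp) (hfuel : n.toNat < fuel) {a b : Int}
    (ha0 : 0 ≤ a) (ha1 : a < n) (hb0 : 0 ≤ b) (hb1 : b < n) :
    InvAB n (connectA fuel d a b).1
      (if PySem.List.pyGetD comp a 0 ≠ PySem.List.pyGetD comp b 0 then
         comp.map (fun c => if c = PySem.List.pyGetD comp b 0 then PySem.List.pyGetD comp a 0 else c)
       else comp) := by
  obtain ⟨hWF, hlen, hkern⟩ := hInv
  obtain ⟨ra, rb, hra, hrb, hWF', hfwd⟩ := connectA_spec hWF ha0 ha1 hb0 hb1 hfuel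
  set ca := PySem.List.pyGetD comp a 0 with hca
  set cb := PySem.List.pyGetD comp b 0 with hcb
  have hiffab : ra = rb ↔ ca = cb := hkern a b ra rb ha0 ha1 hb0 hb1 hra hrb
  by_cases hcab : ca = cb
  · have hrab : ra = rb := hiffab.mpr hcab
    rw [if_neg (by simpa using hcab)]
    refine ⟨hWF', hlen, ?_⟩
    intro i j ri' rj' hi0 hi1 hj0 hj1 hri' hrj'
    obtain ⟨ri, hri⟩ := roots_total hWF hi0 hi1
    obtain ⟨rj, hrj⟩ := roots_total hWF hj0 hj1
    have h1 := hfwd i ri hri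
    have h2 := hfwd j rj hrj
    rw [if_pos hrab] at h1 h2
    rw [roots_unique hri' h1, roots_unique hrj' h2]
    exact hkern i j ri rj hi0 hi1 hj0 hj1 hri hrj
  · have hrab : ra ≠ rb := fun h => hcab (hiffab.mp h)
    rw [if_pos (by simpa using hcab)]
    have hgm : ∀ x : Int, 0 ≤ x → x < n →
        PySem.List.pyGetD (comp.map (fun c => if c = cb then ca else c)) x 0 =
          (if PySem.List.pyGetD comp x 0 = cb then ca else PySem.List.pyGetD comp x 0) := by
      intro x hx0 hx1
      rw [PySem.List.pyGetD_eq_getElem _ _ hx0 (by rw [List.length_map, hlen]; omega),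
          List.getElem_map,
          ← PySem.List.pyGetD_eq_getElem comp (0 : Int) hx0 (by rw [hlen]; omega)]
    refine ⟨hWF', by rw [List.length_map, hlen], ?_⟩
    intro i j ri' rj' hi0 hi1 hj0 hj1 hri' hrj'
    obtain ⟨ri, hri⟩ := roots_total hWF hi0 hi1
    obtain ⟨rj, hrj⟩ := roots_total hWF hj0 hj1
    have h1 := hfwd i ri hri
    have h2 := hfwd j rj hrj
    rw [if_neg hrab] at h1 h2
    rw [roots_unique hri' h1, roots_unique hrj' h2]
    rw [hgm i hi0 hi1, hgm j hj0 hj1]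
    have Iia : ri = ra ↔ PySem.List.pyGetD comp i 0 = ca :=
      hkern i a ri ra hi0 hi1 ha0 ha1 hri hra
    have Iib : ri = rb ↔ PySem.List.pyGetD comp i 0 = cb :=
      hkern i b ri rb hi0 hi1 hb0 hb1 hri hrb
    have Ija : rj = ra ↔ PySem.List.pyGetD comp j 0 = ca :=
      hkern j a rj ra hj0 hj1 ha0 ha1 hrj hra
    have Ijb : rj = rb ↔ PySem.List.pyGetD comp j 0 = cb :=
      hkern j b rj rb hj0 hj1 hb0 hb1 hrj hrb
    have Iij : ri = rj ↔ PySem.List.pyGetD comp i 0 = PySem.List.pyGetD comp j 0 :=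
      hkern i j ri rj hi0 hi1 hj0 hj1 hri hrj
    exact merge_kernel Iia Iib Ija Ijb Iij


theorem fold_edges {n : Int} {fuel : Nat} (hfuel : n.toNat < fuel)
    (E : List (Int × Int × Int))
    (hE : ∀ t ∈ E, 0 ≤ t.2.1 ∧ t.2.1 < n ∧ 0 ≤ t.2.2 ∧ t.2.2 < n) :
    ∀ (ks : List Int), (∀ k ∈ ks, 0 ≤ k ∧ k < (E.length : Int)) →
    ∀ (d : PySem.Dict Int Int) (comp : List Int), InvAB n d comp →
    InvAB n
      (ks.foldl (fun par k =>
        let t := PySem.List.pyGetD E k (0, 0, 0)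
        (connectA fuel par t.2.1 t.2.2).1) d)
      (ks.foldl (fun comp k =>
        let t := PySem.List.pyGetD E k (0, 0, 0)
        let ca := PySem.List.pyGetD comp t.2.1 0
        let cb := PySem.List.pyGetD comp t.2.2 0
        if ca ≠ cb then comp.map (fun c => if c = cb then ca else c) else comp) comp) := by
  intro ks
  induction ks with
  | nil => intro _ d comp h; exact h
  | cons k ks ih =>
    intro hks d comp hInv
    simp only [List.foldl_cons]
    have hk := hks k (List.mem_cons_self ..)
    have hmem : PySem.List.pyGetD E k (0, 0, 0) ∈ E := by
      apply PySem.List.pyGetD_mem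
      simp only [PySem.Raise.InRange]
      omega
    obtain ⟨ha0, ha1, hb0, hb1⟩ := hE _ hmem
    exact ih (fun k' hk' => hks k' (List.mem_cons_of_mem _ hk')) _ _
      (edge_step hInv hfuel ha0 ha1 hb0 hb1)

theorem mem_foldl_insertBy {y : Int × Int × Int} :
    ∀ (xs acc : List (Int × Int × Int)),
    (y ∈ xs.foldl (fun acc x => PySem.List.insertBy pyLexLt3 x acc) acc ↔ y ∈ acc ∨ y ∈ xs) := by
  intro xs
  induction xs with
  | nil => intro acc; simp
  | cons x xs ih =>
    intro acc
    simp only [List.foldl_cons, ih, PySem.List.mem_insertBy, List.mem_cons]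
    tauto

theorem mem_pySorted3 {y : Int × Int × Int} {xs : List (Int × Int × Int)} :
    y ∈ pySorted3 xs ↔ y ∈ xs := by
  unfold pySorted3
  rw [mem_foldl_insertBy]
  simp

theorem mem_get_distances {bc : List (Int × Int × Int)} {t : Int × Int × Int}
    (ht : t ∈ get_distances bc) :
    0 ≤ t.2.1 ∧ t.2.1 < (bc.length : Int) ∧ 0 ≤ t.2.2 ∧ t.2.2 < (bc.length : Int) ∧
      t.2.1 < t.2.2 := by
  unfold get_distances at ht
  rw [mem_pySorted3] at ht
  rw [PySem.List.foldl_congr_mem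
      (PySem.List.pyRange 0 (PySem.List.len bc - 1) 1)
      (fun acc i =>
        (PySem.List.pyRange (i + 1) (PySem.List.len bc) 1).foldl (fun acc j =>
          acc ++ [(get_sqared_distance (PySem.List.pyGetD bc i (0, 0, 0))
            (PySem.List.pyGetD bc j (0, 0, 0)), i, j)]) acc)
      (fun acc i =>
        acc ++ (PySem.List.pyRange (i + 1) (PySem.List.len bc) 1).map (fun j =>
          (get_sqared_distance (PySem.List.pyGetD bc i (0, 0, 0))
            (PySem.List.pyGetD bc j (0, 0, 0)), i, j)))
      []
      (by intro acc x _; dsimp only; rw [PySem.List.foldl_append_singleton_eq_map])] at ht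
  rw [PySem.List.foldl_append_eq_flatMap] at ht
  simp only [List.nil_append, List.mem_flatMap, List.mem_map, PySem.List.mem_pyRange_one,
    PySem.List.len_eq] at ht
  obtain ⟨i, ⟨hi0, hi1⟩, j, ⟨hj0, hj1⟩, rfl⟩ := ht
  simp only []
  omega


theorem count_loop {n : Int} {fuel : Nat} (hfuel : n.toNat < fuel) :
    ∀ (nodes : List Int) (d : PySem.Dict Int Int) (sizes : PySem.Dict Int Int),
    WFd n d → (∀ x ∈ nodes, 0 ≤ x ∧ x < n) →
    ∃ rs : List Int, rs.length = nodes.length ∧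
      (∀ p : Nat, p < nodes.length → RootsTo d (nodes.getD p 0) (rs.getD p 0)) ∧
      (nodes.foldl (fun st node =>
          let fr := findA fuel st.1 node
          (fr.1, st.2.insert fr.2 (st.2.getD fr.2 0 + 1))) (d, sizes)).2
        = rs.foldl (fun s r => s.insert r (s.getD r 0 + 1)) sizes := by
  intro nodes
  induction nodes with
  | nil =>
    intro d sizes hWF _
    exact ⟨[], rfl, fun p hp => absurd hp (by simp), rfl⟩
  | cons x nodes ih =>
    intro d sizes hWF hmem
    obtain ⟨hx0, hx1⟩ := hmem x (List.mem_cons_self ..)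
    obtain ⟨hWF1, hroot, hiff⟩ := findA_spec' hWF hx0 hx1 hfuel
    obtain ⟨rs, hlen, hrs, heq⟩ := ih (findA fuel d x).1
      (sizes.insert (findA fuel d x).2 (sizes.getD (findA fuel d x).2 0 + 1)) hWF1
      (fun y hy => hmem y (List.mem_cons_of_mem _ hy))
    refine ⟨(findA fuel d x).2 :: rs, by simp [hlen], ?_, ?_⟩
    · intro p hp
      cases p with
      | zero => exact hroot
      | succ p =>
        simp only [List.getD_cons_succ]
        exact (hiff _ _).mpr (hrs p (by simpa using hp))
    · simp only [List.foldl_cons]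
      exact heq

theorem getD_mem_int (L : List Int) (p : Nat) (h : p < L.length) : L.getD p 0 ∈ L := by
  rw [List.getD_eq_getElem _ _ h]
  exact List.getElem_mem h

theorem kernel_core :
    ∀ (l : List (Int × Int)),
    (∀ x ∈ l, ∀ y ∈ l, (x.1 = y.1 ↔ x.2 = y.2)) →
    (PySem.Set.ofList (l.map Prod.fst)).length = (PySem.Set.ofList (l.map Prod.snd)).length ∧
    (∀ p : Nat, p < (PySem.Set.ofList (l.map Prod.fst)).length →
      ∀ x ∈ l, (x.1 = (PySem.Set.ofList (l.map Prod.fst)).getD p 0 ↔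
                x.2 = (PySem.Set.ofList (l.map Prod.snd)).getD p 0)) := by
  intro l
  induction l using List.reverseRecOn with
  | nil => exact fun _ => ⟨rfl, fun p hp x hx => absurd hx (by simp)⟩
  | append_singleton l ab ih =>
    intro hker
    have hker' : ∀ x ∈ l, ∀ y ∈ l, (x.1 = y.1 ↔ x.2 = y.2) := fun x hx y hy =>
      hker x (List.mem_append_left _ hx) y (List.mem_append_left _ hy)
    obtain ⟨ihlen, ihcorr⟩ := ih hker'
    have habl : ab ∈ l ++ [ab] := List.mem_append_right _ (List.mem_singleton.mpr rfl)
    have hmemiff : ab.1 ∈ PySem.Set.ofList (l.map Prod.fst) ↔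
        ab.2 ∈ PySem.Set.ofList (l.map Prod.snd) := by
      rw [PySem.Set.mem_ofList, PySem.Set.mem_ofList]
      simp only [List.mem_map]
      constructor
      · rintro ⟨c, hc, hc1⟩
        exact ⟨c, hc, (hker c (List.mem_append_left _ hc) ab habl).mp hc1⟩
      · rintro ⟨c, hc, hc2⟩
        exact ⟨c, hc, (hker c (List.mem_append_left _ hc) ab habl).mpr hc2⟩
    have e1 : l.map Prod.fst ++ [ab.1] = (l ++ [ab]).map Prod.fst := by simp
    have e2 : l.map Prod.snd ++ [ab.2] = (l ++ [ab]).map Prod.snd := by simp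
    rw [← e1, ← e2, PySem.Set.ofList_append_singleton, PySem.Set.ofList_append_singleton]
    by_cases hmem : ab.1 ∈ PySem.Set.ofList (l.map Prod.fst)
    · have hmem2 : ab.2 ∈ PySem.Set.ofList (l.map Prod.snd) := hmemiff.mp hmem
      rw [PySem.Set.add_of_mem hmem, PySem.Set.add_of_mem hmem2]
      refine ⟨ihlen, ?_⟩
      intro p hp x hx
      rcases List.mem_append.mp hx with hx | hx
      · exact ihcorr p hp x hx
      · rw [List.mem_singleton] at hx
        subst hx
        obtain ⟨c, hc, hc1⟩ := by
          have := (PySem.Set.mem_ofList _ _).mp hmem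
          simpa only [List.mem_map] using this
        have hc2 : c.2 = x.2 := (hker c (List.mem_append_left _ hc) x habl).mp hc1
        have hcorr := ihcorr p hp c hc
        rw [← hc1, ← hc2]
        exact hcorr
    · have hmem2 : ab.2 ∉ PySem.Set.ofList (l.map Prod.snd) := fun h => hmem (hmemiff.mpr h)
      rw [PySem.Set.add_of_not_mem hmem, PySem.Set.add_of_not_mem hmem2]
      constructor
      · simp [ihlen]
      intro p hp x hx
      rw [List.length_append] at hp
      by_cases hpl : p < (PySem.Set.ofList (l.map Prod.fst)).length
      · rw [List.getD_append _ _ _ _ hpl, List.getD_append _ _ _ _ (by omega)]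
        rcases List.mem_append.mp hx with hx | hx
        · exact ihcorr p hpl x hx
        · rw [List.mem_singleton] at hx
          subst hx
          constructor
          · intro h
            exfalso
            apply hmem
            rw [h]
            exact getD_mem_int _ _ hpl
          · intro h
            exfalso
            apply hmem2
            rw [h]
            exact getD_mem_int _ _ (by omega)
      · have hpe : p = (PySem.Set.ofList (l.map Prod.fst)).length := by simp at hp; omega
        have hpe2 : p = (PySem.Set.ofList (l.map Prod.snd)).length := by omega
        have g1 : ((PySem.Set.ofList (l.map Prod.fst)) ++ [ab.1]).getD p 0 = ab.1 := by
          rw [hpe]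
          simp
        have g2 : ((PySem.Set.ofList (l.map Prod.snd)) ++ [ab.2]).getD p 0 = ab.2 := by
          rw [hpe2]
          simp
        rw [g1, g2]
        exact hker x hx ab habl

theorem kernel_values (l : List (Int × Int))
    (hker : ∀ x ∈ l, ∀ y ∈ l, (x.1 = y.1 ↔ x.2 = y.2)) :
    (PySem.Set.ofList (l.map Prod.fst)).map (fun k => (((l.map Prod.fst).count k : Nat) : Int)) =
    (PySem.Set.ofList (l.map Prod.snd)).map (fun k => (((l.map Prod.snd).count k : Nat) : Int)) := by
  obtain ⟨hlen, hcorr⟩ := kernel_core l hker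
  apply List.ext_getElem (by simp [hlen])
  intro p h1 h2
  simp only [List.getElem_map]
  congr 1
  have h1' : p < (PySem.Set.ofList (l.map Prod.fst)).length := by simpa using h1
  have h2' : p < (PySem.Set.ofList (l.map Prod.snd)).length := by simpa using h2
  simp only [List.count_eq_countP, List.countP_map]
  apply List.countP_congr
  intro x hx
  have hco := hcorr p h1' x hx
  rw [List.getD_eq_getElem _ _ h1', List.getD_eq_getElem _ _ h2'] at hco
  simp only [Function.comp_apply]
  by_cases hh : x.1 = (PySem.Set.ofList (l.map Prod.fst))[p]
  · simp [hh, hco.mp hh]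
  · have h2x : ¬ x.2 = (PySem.Set.ofList (l.map Prod.snd))[p] := fun h => hh (hco.mpr h)
    simp [hh, h2x]

theorem prod_take :
    ∀ (k : Nat) (xs : List Int), k ≤ xs.length → ∀ (r : Int),
    (PySem.List.pyRange 0 (k : Int) 1).foldl (fun res i => res * PySem.List.pyGetD xs i 1) r
      = (xs.take k).foldl (fun res s => res * s) r := by
  intro k
  induction k with
  | zero =>
    intro xs _ r
    rw [PySem.List.pyRange_one_eq_nil (by omega)]
    simp
  | succ k ih =>
    intro xs hk r
    have hcast : ((k + 1 : Nat) : Int) = (k : Int) + 1 := by push_cast; ring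
    rw [hcast, PySem.List.pyRange_one_succ_right (by omega), List.foldl_append]
    rw [ih xs (by omega) r]
    rw [List.take_add_one]
    have hgk : xs[k]? = some (xs[k]'(by omega)) := List.getElem?_eq_getElem (by omega)
    rw [hgk, List.foldl_append]
    simp only [Option.toList_some, List.foldl_cons, List.foldl_nil]
    rw [PySem.List.pyGetD_eq_getElem xs 1 (by omega) (by omega)]
    norm_num

theorem prod_phase (xs : List Int) (t : Int) :
    (PySem.List.pyRange 0 (min t (PySem.List.len xs)) 1).foldl
        (fun res i => res * PySem.List.pyGetD xs i 1) 1
      = (PySem.List.slice xs none (some (max 0 (min t (PySem.List.len xs))))).foldl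
        (fun res s => res * s) 1 := by
  by_cases hm : min t (PySem.List.len xs) ≤ 0
  · rw [PySem.List.pyRange_one_eq_nil hm]
    have hmax : max 0 (min t (PySem.List.len xs)) = 0 := by omega
    rw [hmax, PySem.List.slice_to xs (by omega)]
    simp
  · have hm' : 0 < min t (PySem.List.len xs) := by omega
    have hmax : max 0 (min t (PySem.List.len xs)) = min t (PySem.List.len xs) := by omega
    rw [hmax, PySem.List.slice_to xs (by omega)]
    have hle : (min t (PySem.List.len xs)).toNat ≤ xs.length := by
      simp only [PySem.List.len_eq] at *
      omega
    have hcast : min t (PySem.List.len xs) = (((min t (PySem.List.len xs)).toNat : Nat) : Int) := by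
      omega
    rw [hcast]
    exact prod_take _ xs hle 1


theorem pyRange_getD {n : Int} {p : Nat} (hp : (p : Int) < n) :
    (PySem.List.pyRange 0 n 1).getD p 0 = (p : Int) := by
  have hlen : p < (PySem.List.pyRange 0 n 1).length := by
    rw [PySem.List.length_pyRange_one]; omega
  rw [List.getD_eq_getElem _ _ hlen, PySem.List.getElem_pyRange_one]
  omega

theorem sizes_values_eq (rs comp : List Int)
    (hlen : rs.length = comp.length)
    (hker : ∀ p q : Nat, p < rs.length → q < rs.length →
      (rs.getD p 0 = rs.getD q 0 ↔ comp.getD p 0 = comp.getD q 0)) :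
    (rs.foldl (fun s r => s.insert r (s.getD r 0 + 1)) (PySem.Dict.empty : PySem.Dict Int Int)).values =
    (comp.foldl (fun d c => d.insert c (d.getD c 0 + 1)) (PySem.Dict.empty : PySem.Dict Int Int)).values := by
  show (PySem.Dict.counter rs).values = (PySem.Dict.counter comp).values
  have hv : ∀ xs : List Int, (PySem.Dict.counter xs).values =
      (PySem.Set.ofList xs).map (fun k => ((xs.count k : Nat) : Int)) := by
    intro xs
    have : (PySem.Dict.counter xs).values = (PySem.Dict.counter xs).items.map (fun x => x.2) := rfl
    rw [this, PySem.Dict.items_counter, List.map_map]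
    rfl
  rw [hv, hv]
  have hzip1 : (rs.zip comp).map Prod.fst = rs := List.map_fst_zip (by omega)
  have hzip2 : (rs.zip comp).map Prod.snd = comp := List.map_snd_zip (by omega)
  conv_lhs => rw [← hzip1]
  conv_rhs => rw [← hzip2]
  apply kernel_values
  intro x hx y hy
  obtain ⟨p, hp, hxp⟩ := List.getElem_of_mem hx
  obtain ⟨q, hq, hyq⟩ := List.getElem_of_mem hy
  rw [List.length_zip] at hp hq
  rw [List.getElem_zip] at hxp hyq
  subst hxp hyq
  simp only []
  have hp1 : p < rs.length := by omega
  have hq1 : q < rs.length := by omega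
  rw [← List.getD_eq_getElem rs 0 hp1, ← List.getD_eq_getElem rs 0 hq1,
      ← List.getD_eq_getElem comp 0 (by omega), ← List.getD_eq_getElem comp 0 (by omega)]
  exact hker p q hp1 hq1



theorem st_values_eq {n : Int} {fuel : Nat} (hfuel : n.toNat < fuel)
    {d : PySem.Dict Int Int} {comp : List Int} (hInv : InvAB n d comp) :
    ((PySem.List.pyRange 0 n 1).foldl (fun st node =>
        let fr := findA fuel st.1 node
        (fr.1, st.2.insert fr.2 (st.2.getD fr.2 0 + 1)))
      (d, (PySem.Dict.empty : PySem.Dict Int Int))).2.values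
    = (comp.foldl (fun dd c => dd.insert c (dd.getD c 0 + 1))
        (PySem.Dict.empty : PySem.Dict Int Int)).values := by
  obtain ⟨rs, hlen, hroots, heq⟩ := count_loop hfuel (PySem.List.pyRange 0 n 1) d
    PySem.Dict.empty hInv.1 (fun x hx => PySem.List.mem_pyRange_one.mp hx)
  rw [heq]
  have hlen2 : comp.length = n.toNat := hInv.2.1
  have hlenr : rs.length = (n - 0).toNat := by
    rw [hlen, PySem.List.length_pyRange_one]
  apply sizes_values_eq rs comp (by omega)
  intro p q hp hq
  have hpn : ((p : Nat) : Int) < n := by omega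
  have hqn : ((q : Nat) : Int) < n := by omega
  have hrp := hroots p (by omega)
  have hrq := hroots q (by omega)
  rw [pyRange_getD hpn] at hrp
  rw [pyRange_getD hqn] at hrq
  have := hInv.2.2 (p : Int) (q : Int) (rs.getD p 0) (rs.getD q 0)
    (by omega) hpn (by omega) hqn hrp hrq
  rw [PySem.List.pyGetD_natCast, PySem.List.pyGetD_natCast] at this
  exact this

theorem main_core (bc : List (Int × Int × Int)) (noc tn : Int)
    (D : List (Int × Int × Int))
    (hD : ∀ t ∈ D, 0 ≤ t.2.1 ∧ t.2.1 < (bc.length : Int) ∧ 0 ≤ t.2.2 ∧ t.2.2 < (bc.length : Int)) :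
    (let n := PySem.List.len bc
     let fuel := bc.length + 1
     let parent0 : PySem.Dict Int Int :=
       (PySem.List.pyRange 0 n 1).foldl (fun d i => d.insert i i) PySem.Dict.empty
     let max_connections := min noc (PySem.List.len D)
     let parent1 := (PySem.List.pyRange 0 max_connections 1).foldl (fun par k =>
         let t := PySem.List.pyGetD D k (0, 0, 0)
         (connectA fuel par t.2.1 t.2.2).1) parent0
     let st := (PySem.List.pyRange 0 n 1).foldl (fun st node =>
         let fr := findA fuel st.1 node
         (fr.1, st.2.insert fr.2 (st.2.getD fr.2 0 + 1))) (parent1, (PySem.Dict.empty : PySem.Dict Int Int))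
     let sizes := PySem.List.sorted st.2.values (fun x => x) true
     (PySem.List.pyRange 0 (min tn (PySem.List.len sizes)) 1).foldl
       (fun result i => result * PySem.List.pyGetD sizes i 1) 1)
    =
    (let n := PySem.List.len bc
     let max_connections := min noc (PySem.List.len D)
     let comp := (PySem.List.pyRange 0 max_connections 1).foldl (fun comp k =>
         let t := PySem.List.pyGetD D k (0, 0, 0)
         let ca := PySem.List.pyGetD comp t.2.1 0
         let cb := PySem.List.pyGetD comp t.2.2 0
         if ca ≠ cb then comp.map (fun c => if c = cb then ca else c) else comp)
       (PySem.List.pyRange 0 n 1)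
     let counts := comp.foldl (fun d c => d.insert c (d.getD c 0 + 1)) (PySem.Dict.empty : PySem.Dict Int Int)
     let sizes := PySem.List.sorted counts.values (fun x => x) true
     (PySem.List.slice sizes none (some (max 0 (min tn (PySem.List.len sizes))))).foldl
       (fun result s => result * s) 1) := by
  have hfuel : (PySem.List.len bc).toNat < bc.length + 1 := by
    simp [PySem.List.len_eq]
  have hD' : ∀ t ∈ D, 0 ≤ t.2.1 ∧ t.2.1 < PySem.List.len bc ∧
      0 ≤ t.2.2 ∧ t.2.2 < PySem.List.len bc := by
    intro t ht
    have := hD t ht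
    simp only [PySem.List.len_eq]
    exact this
  have hks : ∀ k ∈ PySem.List.pyRange 0 (min noc (PySem.List.len D)) 1,
      0 ≤ k ∧ k < (D.length : Int) := by
    intro k hk
    rw [PySem.List.mem_pyRange_one] at hk
    refine ⟨hk.1, lt_of_lt_of_le hk.2 ?_⟩
    have h1 := min_le_right noc (PySem.List.len D)
    simp only [PySem.List.len_eq] at h1
    exact h1
  have hInv := fold_edges hfuel D hD' (PySem.List.pyRange 0 (min noc (PySem.List.len D)) 1)
    hks _ _ (init_Inv (PySem.List.len bc))
  have hvals := st_values_eq hfuel hInv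
  dsimp only
  rw [hvals]
  exact prod_phase _ tn

theorem ports_eq (bc : List (Int × Int × Int)) (noc tn : Int) :
    get_product_of_boxes_in_crucuit bc noc tn = get_product_of_boxes_in_crucuit_alt bc noc tn := by
  unfold get_product_of_boxes_in_crucuit get_product_of_boxes_in_crucuit_alt
  exact main_core bc noc tn (get_distances bc)
    (fun t ht => ⟨(mem_get_distances ht).1, (mem_get_distances ht).2.1,
      (mem_get_distances ht).2.2.1, (mem_get_distances ht).2.2.2.1⟩)

-- ===== VERDICT (by name: the statement is the Claim_ definition above) =====
theorem get_product_of_boxes_in_crucuit_spec : Claim_equal_get_product_of_boxes_in_crucuit := by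
  intro box_coordinates no_of_connections top_n _
  unfold Spec_get_product_of_boxes_in_crucuit
  exact ports_eq box_coordinates no_of_connections top_n
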